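-- pv_equiv track=rewrite | github.com/Diana044/GOA-hw | level 054/homework/hw.py | merge_arrays
-- ===== SOURCE A (Python) =====
-- def merge_arrays(arr1, arr2):
--     a=arr1+arr2
--     new_list=[]
--     for i in a:
--         if i not in new_list:
--             new_list.append(i)
--
--     n = len(new_list)
--     for i in range(n):
--         for x in range(n - 1):
--             if new_list[x] > new_list[x + 1]:
--                 num = new_list[x]
--                 new_list[x] = new_list[x + 1]
--                 new_list[x + 1] = num
--
--     return new_list
-- ===== SOURCE B (Python) =====
-- def merge_arrays(arr1, arr2):
--     res = []
--     prev = None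
--     for x in sorted(arr1 + arr2):
--         if prev is None or x != prev:
--             res.append(x)
--             prev = x
--     return res
-- ===== Notes on version B (the rewrite author's own statement) =====
-- stated objective: faster
-- what changed: B replaces A's quadratic membership-scan dedup followed by an O(n^2) full bubble sort with a single sorted() call and one linear pass that skips adjacent duplicates.
import Mathlib
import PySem

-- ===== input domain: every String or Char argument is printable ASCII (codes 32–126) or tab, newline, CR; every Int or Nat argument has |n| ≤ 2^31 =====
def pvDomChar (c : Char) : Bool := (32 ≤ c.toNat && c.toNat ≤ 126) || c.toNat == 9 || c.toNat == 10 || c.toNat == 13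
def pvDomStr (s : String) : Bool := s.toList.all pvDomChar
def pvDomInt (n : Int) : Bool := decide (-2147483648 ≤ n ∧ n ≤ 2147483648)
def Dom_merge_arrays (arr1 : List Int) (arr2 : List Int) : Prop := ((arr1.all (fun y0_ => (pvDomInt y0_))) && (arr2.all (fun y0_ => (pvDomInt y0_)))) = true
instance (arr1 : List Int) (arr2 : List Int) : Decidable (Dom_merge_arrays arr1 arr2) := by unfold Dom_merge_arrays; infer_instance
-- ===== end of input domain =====

-- B sorts the merged list once and removes adjacent duplicates in one pass,
-- replacing A's membership-scan dedup followed by a bubble sort (objective: faster).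

-- ===== PORT A =====
-- inner loop 'for x in range(n-1): compare new_list[x], new_list[x+1], swap':
-- one left-to-right bubble pass over the list, same comparisons and swaps in the same order
def pvBubblePass : List Int → List Int
  | x :: y :: rest => if x > y then y :: pvBubblePass (x :: rest) else x :: pvBubblePass (y :: rest)
  | l => l

def merge_arrays (arr1 : List Int) (arr2 : List Int) : List Int :=
  let a := arr1 ++ arr2
  let new_list := a.foldl (fun acc i => if i ∈ acc then acc else acc ++ [i]) []
  let n := new_list.length
  (List.range n).foldl (fun l _ => pvBubblePass l) new_list

-- ===== PORT B =====
-- state (res, prev): append x and set prev := x when prev is None or x ≠ prev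
def merge_arrays_alt (arr1 : List Int) (arr2 : List Int) : List Int :=
  ((PySem.List.sorted (arr1 ++ arr2) (fun x => x) false).foldl
    (fun st x => if st.2 = none ∨ some x ≠ st.2 then (st.1 ++ [x], some x) else st)
    (([] : List Int), (none : Option Int))).1

-- ===== PRECONDITION & SPEC =====
def Spec_merge_arrays (arr1 : List Int) (arr2 : List Int) (out : List Int) : Prop := out = merge_arrays_alt arr1 arr2
instance (arr1 : List Int) (arr2 : List Int) (out : List Int) : Decidable (Spec_merge_arrays arr1 arr2 out) := by unfold Spec_merge_arrays; infer_instance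

-- ===== CLAIM (what is proved, stated in full; the proofs are below) =====
def Claim_equal_merge_arrays : Prop := ∀ (arr1 : List Int) (arr2 : List Int), Dom_merge_arrays arr1 arr2 → Spec_merge_arrays arr1 arr2 (merge_arrays arr1 arr2)

-- ===== LEMMAS AND PROOFS =====

-- A's dedup loop: the result is Nodup with exactly the elements of acc ∪ a
theorem pvDedup_inv (a : List Int) : ∀ acc : List Int, acc.Nodup →
    (a.foldl (fun acc i => if i ∈ acc then acc else acc ++ [i]) acc).Nodup ∧
    (∀ z, z ∈ a.foldl (fun acc i => if i ∈ acc then acc else acc ++ [i]) acc ↔ z ∈ acc ∨ z ∈ a) := by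
  induction a with
  | nil => intro acc h; simpa using h
  | cons i a ih =>
    intro acc h
    simp only [List.foldl_cons]
    by_cases hi : i ∈ acc
    · rw [if_pos hi]
      obtain ⟨ihn, ihm⟩ := ih acc h
      refine ⟨ihn, fun z => ?_⟩
      rw [ihm z]
      constructor
      · rintro (hz | hz); exacts [Or.inl hz, Or.inr (List.mem_cons_of_mem i hz)]
      · rintro (hz | hz)
        · exact Or.inl hz
        · rcases List.mem_cons.mp hz with h1 | h1
          · exact Or.inl (h1 ▸ hi)
          · exact Or.inr h1
    · rw [if_neg hi]
      have hnd : (acc ++ [i]).Nodup := by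
        simp only [List.nodup_append]
        refine ⟨h, List.nodup_singleton i, fun u hu v hv => ?_⟩
        simp only [List.mem_singleton] at hv
        exact fun he => hi ((he.trans hv) ▸ hu)
      obtain ⟨ihn, ihm⟩ := ih (acc ++ [i]) hnd
      refine ⟨ihn, fun z => ?_⟩
      rw [ihm z]
      simp [or_assoc, or_comm, or_left_comm]

theorem pvBubblePass_perm (l : List Int) : (pvBubblePass l).Perm l := by
  match l with
  | [] => simp [pvBubblePass]
  | [x] => simp [pvBubblePass]
  | x :: y :: rest =>
    rw [pvBubblePass]
    split
    · exact (List.Perm.cons y (pvBubblePass_perm (x :: rest))).trans (List.Perm.swap x y rest)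
    · exact List.Perm.cons x (pvBubblePass_perm (y :: rest))

-- one bubble pass floats a maximum to the end
theorem pvBubblePass_max : ∀ (a : Int) (l : List Int),
    ∃ front M, pvBubblePass (a :: l) = front ++ [M] ∧ (∀ x ∈ a :: l, x ≤ M) := by
  intro a l
  induction l generalizing a with
  | nil => exact ⟨[], a, by simp [pvBubblePass]⟩
  | cons b rest ih =>
    by_cases hab : a > b
    · obtain ⟨f, M, hf, hM⟩ := ih a
      refine ⟨b :: f, M, ?_, ?_⟩
      · rw [pvBubblePass]; simp [hab, hf]
      · intro z hz
        rcases List.mem_cons.mp hz with h | h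
        · subst h; exact hM z (List.mem_cons_self)
        · rcases List.mem_cons.mp h with h' | h'
          · subst h'; exact le_of_lt (lt_of_lt_of_le hab (hM a List.mem_cons_self))
          · exact hM z (List.mem_cons_of_mem a h')
    · obtain ⟨f, M, hf, hM⟩ := ih b
      refine ⟨a :: f, M, ?_, ?_⟩
      · rw [pvBubblePass]; simp [hab, hf]
      · intro z hz
        rcases List.mem_cons.mp hz with h | h
        · subst h; exact le_trans (le_of_not_gt hab) (hM b List.mem_cons_self)
        · exact hM z h

theorem pvBubblePass_append_max (front : List Int) (M : Int)
    (hle : ∀ x ∈ front, x ≤ M) : pvBubblePass (front ++ [M]) = pvBubblePass front ++ [M] := by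
  match front with
  | [] => simp [pvBubblePass]
  | [a] =>
      have h : ¬ a > M := not_lt.mpr (hle a List.mem_cons_self)
      simp [pvBubblePass, h]
  | a :: b :: rest =>
      have hble : ∀ x ∈ b :: rest, x ≤ M := fun x hx => hle x (List.mem_cons_of_mem a hx)
      have hale : ∀ x ∈ a :: rest, x ≤ M := by
        intro x hx
        rcases List.mem_cons.mp hx with h | h
        · exact hle x (h ▸ List.mem_cons_self)
        · exact hle x (List.mem_cons_of_mem a (List.mem_cons_of_mem b h))
      by_cases hab : a > b
      · have h1 : pvBubblePass ((a :: b :: rest) ++ [M]) = b :: pvBubblePass ((a :: rest) ++ [M]) := by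
          simp only [List.cons_append]
          rw [pvBubblePass]
          simp [hab]
        have h2 : pvBubblePass (a :: b :: rest) = b :: pvBubblePass (a :: rest) := by
          rw [pvBubblePass]; simp [hab]
        rw [h1, pvBubblePass_append_max (a :: rest) M hale, h2]
        rfl
      · have h1 : pvBubblePass ((a :: b :: rest) ++ [M]) = a :: pvBubblePass ((b :: rest) ++ [M]) := by
          simp only [List.cons_append]
          rw [pvBubblePass]
          simp [hab]
        have h2 : pvBubblePass (a :: b :: rest) = a :: pvBubblePass (b :: rest) := by
          rw [pvBubblePass]; simp [hab]
        rw [h1, pvBubblePass_append_max (b :: rest) M hble, h2]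
        rfl
  termination_by front.length

theorem pvBubblePass_iter_append_max (n : Nat) : ∀ (front : List Int) (M : Int),
    (∀ x ∈ front, x ≤ M) →
    pvBubblePass^[n] (front ++ [M]) = pvBubblePass^[n] front ++ [M] := by
  induction n with
  | zero => intro front M _; simp
  | succ n ih =>
    intro front M hle
    rw [Function.iterate_succ_apply, Function.iterate_succ_apply,
        pvBubblePass_append_max front M hle, ih]
    intro x hx
    exact hle x ((pvBubblePass_perm front).mem_iff.mp hx)

theorem pvBubblePass_iter_perm (n : Nat) (l : List Int) : (pvBubblePass^[n] l).Perm l := by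
  induction n with
  | zero => simp
  | succ n ih => rw [Function.iterate_succ_apply']; exact (pvBubblePass_perm _).trans ih

theorem pvBubblePass_iter_sorted : ∀ (n : Nat) (l : List Int), l.length ≤ n →
    (pvBubblePass^[n] l).Pairwise (· ≤ ·) := by
  intro n
  induction n with
  | zero =>
    intro l hl
    have : l = [] := List.eq_nil_of_length_eq_zero (Nat.le_zero.mp hl)
    simp [this]
  | succ n ih =>
    intro l hl
    match l with
    | [] => simp [Function.iterate_fixed (by simp [pvBubblePass] : pvBubblePass [] = [])]
    | a :: t =>
      obtain ⟨front, M, hf, hM⟩ := pvBubblePass_max a t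
      have hfle : ∀ x ∈ front, x ≤ M := by
        intro x hx
        exact hM x ((pvBubblePass_perm (a :: t)).mem_iff.mp (by simp [hf, hx]))
      have hlen : front.length ≤ n := by
        have hlen' := (pvBubblePass_perm (a :: t)).length_eq
        rw [hf] at hlen'; simp at hlen'
        simp at hl; omega
      rw [Function.iterate_succ_apply, hf, pvBubblePass_iter_append_max n front M hfle]
      apply List.pairwise_append.mpr
      refine ⟨ih front hlen, by simp, ?_⟩
      intro x hx y hy
      simp at hy; subst hy
      exact hfle x ((pvBubblePass_iter_perm n front).mem_iff.mp hx)

theorem pvFoldl_range_iterate (n : Nat) (x : List Int) :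
    (List.range n).foldl (fun l _ => pvBubblePass l) x = pvBubblePass^[n] x := by
  induction n with
  | zero => simp
  | succ n ih => rw [List.range_succ, List.foldl_append, ih, Function.iterate_succ_apply']; rfl

-- B's adjacent-dedup loop invariant
theorem pvAdj_inv : ∀ (s res : List Int) (p : Int),
    s.Pairwise (· ≤ ·) → res.Pairwise (· < ·) → (∀ z ∈ res, z ≤ p) → p ∈ res →
    (∀ y ∈ s, p ≤ y) →
    (s.foldl (fun st x => if st.2 = none ∨ some x ≠ st.2 then (st.1 ++ [x], some x) else st)
        (res, some p)).1.Pairwise (· < ·) ∧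
    (∀ z, z ∈ (s.foldl (fun st x => if st.2 = none ∨ some x ≠ st.2 then (st.1 ++ [x], some x) else st)
        (res, some p)).1 ↔ z ∈ res ∨ z ∈ s) := by
  intro s
  induction s with
  | nil => intro res p _ h2 _ _ _; exact ⟨h2, by simp⟩
  | cons x s ih =>
    intro res p h1 h2 h3 h4 h5
    have hpx : p ≤ x := h5 x List.mem_cons_self
    by_cases hxp : x = p
    · subst hxp
      simp only [List.foldl_cons]
      rw [if_neg (by simp)]
      obtain ⟨ihp, ihm⟩ := ih res x h1.of_cons h2 h3 h4
        (fun y hy => (List.pairwise_cons.mp h1).1 y hy)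
      refine ⟨ihp, fun z => ?_⟩
      rw [ihm z]
      constructor
      · rintro (h | h); exacts [Or.inl h, Or.inr (List.mem_cons_of_mem x h)]
      · rintro (h | h)
        · exact Or.inl h
        · rcases List.mem_cons.mp h with h' | h'
          · exact Or.inl (h' ▸ h4)
          · exact Or.inr h'
    · have hlt : p < x := by omega
      simp only [List.foldl_cons]
      rw [if_pos (Or.inr (by simpa using fun h => hxp h))]
      have hlt' : ∀ z ∈ res, z < x := fun z hz => lt_of_le_of_lt (h3 z hz) hlt
      have hres' : (res ++ [x]).Pairwise (· < ·) := by
        apply List.pairwise_append.mpr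
        refine ⟨h2, by simp, ?_⟩
        intro u hu v hv
        simp at hv; subst hv
        exact hlt' u hu
      obtain ⟨ihp, ihm⟩ := ih (res ++ [x]) x h1.of_cons hres'
        (by intro z hz
            rcases List.mem_append.mp hz with h | h
            · exact le_of_lt (hlt' z h)
            · simp at h; simp [h])
        (by simp)
        (fun y hy => (List.pairwise_cons.mp h1).1 y hy)
      refine ⟨ihp, fun z => ?_⟩
      rw [ihm z]
      simp [or_assoc, or_comm, or_left_comm]

-- characterisation of B's result: strictly increasing, elements of arr1 ++ arr2
theorem pvAlt_char (arr1 arr2 : List Int) :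
    (merge_arrays_alt arr1 arr2).Pairwise (· < ·) ∧
    (∀ z, z ∈ merge_arrays_alt arr1 arr2 ↔ z ∈ arr1 ++ arr2) := by
  unfold merge_arrays_alt
  have hsp := PySem.List.sorted_pairwise (arr1 ++ arr2) (fun x => x)
  have hmem := fun z => PySem.List.mem_sorted (arr1 ++ arr2) (fun x => x) false z
  generalize hs : PySem.List.sorted (arr1 ++ arr2) (fun x => x) false = s at *
  match s with
  | [] =>
    refine ⟨by simp, fun z => ?_⟩
    simp [← hmem z]
  | x :: t =>
    simp only [List.foldl_cons]
    rw [if_pos (Or.inl trivial)]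
    obtain ⟨ihp, ihm⟩ := pvAdj_inv t ([] ++ [x]) x hsp.of_cons (by simp) (by simp) (by simp)
      (fun y hy => (List.pairwise_cons.mp hsp).1 y hy)
    refine ⟨ihp, fun z => ?_⟩
    rw [ihm z, ← hmem z]
    simp

-- characterisation of A's result: sorted, Nodup, elements of arr1 ++ arr2
theorem pvA_char (arr1 arr2 : List Int) :
    (merge_arrays arr1 arr2).Pairwise (· ≤ ·) ∧ (merge_arrays arr1 arr2).Nodup ∧
    (∀ z, z ∈ merge_arrays arr1 arr2 ↔ z ∈ arr1 ++ arr2) := by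
  unfold merge_arrays
  simp only []
  set a := arr1 ++ arr2 with ha
  set D := a.foldl (fun acc i => if i ∈ acc then acc else acc ++ [i]) [] with hD
  obtain ⟨hdn, hdm⟩ := pvDedup_inv a [] (by simp)
  rw [pvFoldl_range_iterate]
  have hperm := pvBubblePass_iter_perm D.length D
  refine ⟨pvBubblePass_iter_sorted D.length D le_rfl, hperm.nodup_iff.mpr hdn, fun z => ?_⟩
  rw [hperm.mem_iff, hdm z]
  simp

-- ===== VERDICT (by name: the statement is the Claim_ definition above) =====
theorem merge_arrays_spec : Claim_equal_merge_arrays := by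
  intro arr1 arr2 _
  unfold Spec_merge_arrays
  obtain ⟨hA1, hA2, hA3⟩ := pvA_char arr1 arr2
  obtain ⟨hB1, hB2⟩ := pvAlt_char arr1 arr2
  have hBnd : (merge_arrays_alt arr1 arr2).Nodup :=
    List.Pairwise.imp (fun h => ne_of_lt h) hB1
  have hperm : (merge_arrays arr1 arr2).Perm (merge_arrays_alt arr1 arr2) :=
    (List.perm_ext_iff_of_nodup hA2 hBnd).mpr (fun z => by rw [hA3 z, hB2 z])
  exact List.Perm.eq_of_pairwise' hA1 (List.Pairwise.imp le_of_lt hB1) hperm
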